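-- pv_equiv track=rewrite | github.com/akashbangera758/CRNN_Text_Recognition_Tensorflow | src/dataset_util.py | truncateLabel
-- ===== SOURCE A (Python) =====
-- def truncateLabel(text, maxTextLen):
--     '''
--     Description: ctc_loss can't compute loss if it cannot find a mapping between text label and input labels.
--                  Repeat letters cost double because of the blank symbol needing to be inserted.
--                  If a too-long label is provided, ctc_loss returns an infinite gradient
--
--     Input:
--     text: Each label in list of labels.
--     maxTextLen: Max Text Length to be used for training.
--
--     Output:
--     text: Returns the original text if the number of characters is less than maxTextLen.
--           Else returns text upto maxTextLen.
--     '''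
--     try:
--         cost = 0
--         for i in range(len(text)):
--             if i != 0 and text[i] == text[i-1]:
--                 cost += 2
--             else:
--                 cost += 1
--             if cost > maxTextLen:
--                 return text[:i]
--
--         return text
--
--     except:
--         raise
-- ===== SOURCE B (Python) =====
-- def truncateLabel(text, maxTextLen):
--     # Run-length decomposition: a maximal run of L equal characters costs 2*L - 1
--     # under the CTC rule (first char 1, each repeat 2). Walk the runs, spending
--     # the budget a whole run at a time; inside the run that overflows, the number
--     # of affordable characters has the closed form (budget + 1) // 2.
--     n = len(text)
--     budget = maxTextLen
--     i = 0
--     while i < n: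
--         j = i + 1
--         while j < n and text[j] == text[i]:
--             j += 1
--         runcost = 2 * (j - i) - 1
--         if runcost <= budget:
--             budget -= runcost
--             i = j
--         else:
--             t = (budget + 1) // 2
--             return text[:i + max(t, 0)]
--     return text
-- ===== Notes on version B (the rewrite author's own statement) =====
-- stated objective: alternative
-- what changed: B replaces A's per-character cost accumulation with a run-length decomposition: it walks maximal runs of equal characters, charges each whole run its closed-form cost 2*L-1, and inside the run that overflows the budget computes the number of affordable characters directly as (budget+1)//2 instead of scanning character by character.
import Mathlib
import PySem

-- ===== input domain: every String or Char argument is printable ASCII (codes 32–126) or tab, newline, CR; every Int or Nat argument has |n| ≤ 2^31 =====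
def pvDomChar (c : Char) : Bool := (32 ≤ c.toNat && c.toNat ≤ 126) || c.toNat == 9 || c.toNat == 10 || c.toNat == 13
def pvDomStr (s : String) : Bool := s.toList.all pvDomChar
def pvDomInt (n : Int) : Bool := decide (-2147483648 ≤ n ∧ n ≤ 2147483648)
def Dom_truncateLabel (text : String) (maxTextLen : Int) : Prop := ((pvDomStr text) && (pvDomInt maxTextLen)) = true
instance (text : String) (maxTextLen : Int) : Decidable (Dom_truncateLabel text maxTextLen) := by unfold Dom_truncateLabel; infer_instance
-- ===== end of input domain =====

-- B replaces A's per-character cost accumulation with a run-length decomposition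
-- (a run of L equal chars costs 2*L-1; inside the overflowing run the affordable
-- count is (budget+1)//2); same asymptotic cost, different algorithm (objective: alternative).

-- ===== PORT A =====
-- A's for-loop over range(len(text)) with accumulator `cost` and early return text[:i].
def truncateLabelGoA (cs : List Char) (maxTextLen : Int) (i : Nat) (cost : Int) : String :=
  if _h : i < cs.length then
    if cost + (if i ≠ 0 ∧ cs[i]! = cs[i-1]! then (2:Int) else 1) > maxTextLen then
      String.ofList (cs.take i)
    else truncateLabelGoA cs maxTextLen (i+1) (cost + (if i ≠ 0 ∧ cs[i]! = cs[i-1]! then (2:Int) else 1))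
  else String.ofList cs
termination_by cs.length - i

def truncateLabel (text : String) (maxTextLen : Int) : String :=
  truncateLabelGoA text.toList maxTextLen 0 0

-- ===== PORT B =====
-- inner while loop of Source B: advance j while text[j] == text[i]
def pvRunEnd (cs : List Char) (c : Char) (j : Nat) : Nat :=
  if _h : j < cs.length then
    if cs[j]! = c then pvRunEnd cs c (j+1) else j
  else j
termination_by cs.length - j

lemma pvRunEnd_ge (cs : List Char) (c : Char) : ∀ k j, cs.length - j = k → j ≤ pvRunEnd cs c j := by
  intro k
  induction k with
  | zero =>
    intro j hk
    rw [pvRunEnd]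
    split
    · omega
    · exact le_refl j
  | succ k ih =>
    intro j hk
    rw [pvRunEnd]
    split
    · split
      · have := ih (j+1) (by omega)
        omega
      · exact le_refl j
    · exact le_refl j

-- outer while loop of Source B (kept characters always equal the index i)
def truncateLabelGoB (cs : List Char) (budget : Int) (i : Nat) : String :=
  if _h : i < cs.length then
    if 2 * ((pvRunEnd cs cs[i]! (i+1) : Int) - (i:Int)) - 1 ≤ budget then
      truncateLabelGoB cs (budget - (2 * ((pvRunEnd cs cs[i]! (i+1) : Int) - (i:Int)) - 1)) (pvRunEnd cs cs[i]! (i+1))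
    else String.ofList (cs.take (i + (max (PySem.Int.floordiv (budget+1) 2) 0).toNat))
  else String.ofList cs
termination_by cs.length - i
decreasing_by
  have := pvRunEnd_ge cs cs[i]! (cs.length - (i+1)) (i+1) rfl
  omega

def truncateLabel_alt (text : String) (maxTextLen : Int) : String :=
  truncateLabelGoB text.toList maxTextLen 0

-- ===== PRECONDITION & SPEC =====
def Spec_truncateLabel (text : String) (maxTextLen : Int) (out : String) : Prop := out = truncateLabel_alt text maxTextLen
instance (text : String) (maxTextLen : Int) (out : String) : Decidable (Spec_truncateLabel text maxTextLen out) := by unfold Spec_truncateLabel; infer_instance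

-- ===== CLAIM (what is proved, stated in full; the proofs are below) =====
def Claim_equal_truncateLabel : Prop := ∀ (text : String) (maxTextLen : Int), Dom_truncateLabel text maxTextLen → Spec_truncateLabel text maxTextLen (truncateLabel text maxTextLen)

-- ===== LEMMAS AND PROOFS =====

-- reference: number of characters kept, walking with the previous char and remaining budget
def pvCutAux : Option Char → List Char → Int → Nat
  | _, [], _ => 0
  | prev, c :: t, b =>
    let w : Int := if some c = prev then 2 else 1
    if b < w then 0 else 1 + pvCutAux (some c) t (b - w)

lemma pvCutAux_cons (prev : Option Char) (c : Char) (t : List Char) (b : Int) :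
    pvCutAux prev (c :: t) b =
      if b < (if some c = prev then (2:Int) else 1) then 0
      else 1 + pvCutAux (some c) t (b - (if some c = prev then (2:Int) else 1)) := rfl

lemma pvCutAux_nonpos (prev : Option Char) (l : List Char) (b : Int) (hb : b < 1) :
    pvCutAux prev l b = 0 := by
  cases l with
  | nil => rfl
  | cons c t =>
    rw [pvCutAux_cons]
    split_ifs <;> omega

lemma pvFd2_nonneg (b : Int) (h : 0 ≤ b) : 0 ≤ PySem.Int.floordiv b 2 :=
  (PySem.Int.le_floordiv_iff_mul_le (by omega)).mpr (by omega)

lemma pvFd2_nonpos (b : Int) (h : b ≤ 1) : PySem.Int.floordiv b 2 ≤ 0 := by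
  have := (PySem.Int.floordiv_lt_iff_lt_mul (a := b) (b := 2) (q := 1) (by omega)).mpr (by omega)
  omega

lemma pvFd2_succ (b : Int) : PySem.Int.floordiv (b+2) 2 = PySem.Int.floordiv b 2 + 1 := by
  have h := (PySem.Int.floordiv_eq_iff_of_pos (a := b) (b := 2)
    (q := PySem.Int.floordiv b 2) (by omega)).mp rfl
  exact (PySem.Int.floordiv_eq_iff_of_pos (by omega)).mpr (by omega)

-- A's loop equals the reference walk
lemma pvGoA_eq (cs : List Char) (m : Int) :
    ∀ k i cost, cs.length - i = k → i ≤ cs.length →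
    truncateLabelGoA cs m i cost =
      String.ofList (cs.take (i + pvCutAux (if i = 0 then none else some cs[i-1]!) (cs.drop i) (m - cost))) := by
  intro k
  induction k with
  | zero =>
    intro i cost hk hi
    have : i = cs.length := by omega
    subst this
    rw [truncateLabelGoA, dif_neg (lt_irrefl _)]
    simp [pvCutAux]
  | succ k ih =>
    intro i cost hk hi
    have hlt : i < cs.length := by omega
    rw [truncateLabelGoA, dif_pos hlt]
    rw [← List.getElem_cons_drop hlt, pvCutAux_cons]
    have hgi : cs[i]! = cs[i] := getElem!_pos cs i hlt
    have hw : (if some cs[i] = (if i = 0 then none else some cs[i-1]!) then (2:Int) else 1)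
        = (if i ≠ 0 ∧ cs[i]! = cs[i-1]! then (2:Int) else 1) := by
      rw [hgi]
      rcases Nat.eq_zero_or_pos i with h0 | h0
      · subst h0; simp
      · rw [if_neg (show ¬ i = 0 by omega)]
        by_cases he : cs[i] = cs[i-1]!
        · rw [if_pos (by simpa using he), if_pos ⟨by omega, he⟩]
        · rw [if_neg (by simpa using he), if_neg (fun h => he h.2)]
    rw [hw]
    have hprev : (if i + 1 = 0 then none else some cs[(i+1)-1]!) = some cs[i] := by
      rw [if_neg (by omega)]
      simp [hgi]
    by_cases hA : i ≠ 0 ∧ cs[i]! = cs[i-1]!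
    · rw [if_pos hA]
      by_cases hgt : cost + (2:Int) > m
      · rw [if_pos hgt, if_pos (by omega : m - cost < (2:Int))]
        simp
      · rw [if_neg hgt, if_neg (by omega : ¬ m - cost < (2:Int))]
        rw [ih (i+1) (cost + 2) (by omega) (by omega), hprev]
        have harith : m - (cost + 2) = m - cost - 2 := by ring
        rw [harith]
        congr 2
        omega
    · rw [if_neg hA]
      by_cases hgt : cost + (1:Int) > m
      · rw [if_pos hgt, if_pos (by omega : m - cost < (1:Int))]
        simp
      · rw [if_neg hgt, if_neg (by omega : ¬ m - cost < (1:Int))]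
        rw [ih (i+1) (cost + 1) (by omega) (by omega), hprev]
        have harith : m - (cost + 1) = m - cost - 1 := by ring
        rw [harith]
        congr 2
        omega

-- the reference walk across a run of equal characters, entered mid-run (every char costs 2)
lemma pvCut_inrun (cs : List Char) (c : Char) :
    ∀ L i (b : Int), i + L ≤ cs.length → (∀ p, i ≤ p → p < i + L → cs[p]! = c) →
    pvCutAux (some c) (cs.drop i) b =
      if 2*(L:Int) ≤ b then L + pvCutAux (some c) (cs.drop (i+L)) (b - 2*L)
      else (max (PySem.Int.floordiv b 2) 0).toNat := by
  intro L
  induction L with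
  | zero =>
    intro i b hle hrun
    by_cases hb : (0:Int) ≤ b
    · rw [if_pos (by push_cast; omega)]
      simp
    · rw [if_neg (by push_cast; omega)]
      rw [pvCutAux_nonpos _ _ _ (by omega)]
      have := pvFd2_nonpos b (by omega)
      omega
  | succ L ih =>
    intro i b hle hrun
    have hlt : i < cs.length := by omega
    have hc : cs[i] = c := by
      have := hrun i (le_refl i) (by omega)
      rwa [getElem!_pos cs i hlt] at this
    rw [← List.getElem_cons_drop hlt, hc, pvCutAux_cons,
      if_pos (show some c = some c from rfl)]
    by_cases hb : b < 2
    · rw [if_pos hb, if_neg (by push_cast; omega)]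
      have := pvFd2_nonpos b (by omega)
      omega
    · rw [if_neg hb]
      rw [ih (i+1) (b-2) (by omega) (fun p hp1 hp2 => hrun p (by omega) (by omega))]
      by_cases h2 : 2*((L:Int)+1) ≤ b
      · rw [if_pos (by omega), if_pos (by push_cast; omega)]
        have h1 : i + 1 + L = i + (L+1) := by omega
        have h3 : b - 2 - 2*(L:Int) = b - 2*(((L:Nat)+1 : Nat):Int) := by push_cast; ring
        rw [h1, h3]
        push_cast
        omega
      · rw [if_neg (by omega), if_neg (by push_cast; omega)]
        have hsucc : PySem.Int.floordiv b 2 = PySem.Int.floordiv (b-2) 2 + 1 := by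
          have := pvFd2_succ (b-2)
          simp only [sub_add_cancel] at this
          omega
        have hnn := pvFd2_nonneg (b-2) (by omega)
        omega

-- the reference walk across a maximal run entered at its start (first char costs 1)
lemma pvCut_run (cs : List Char) (c : Char) (L i : Nat) (b : Int) (prev : Option Char)
    (hL : 1 ≤ L) (hle : i + L ≤ cs.length) (hrun : ∀ p, i ≤ p → p < i + L → cs[p]! = c)
    (hprev : prev ≠ some c) :
    pvCutAux prev (cs.drop i) b =
      if 2*(L:Int) - 1 ≤ b then L + pvCutAux (some c) (cs.drop (i+L)) (b - (2*(L:Int)-1))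
      else (max (PySem.Int.floordiv (b+1) 2) 0).toNat := by
  obtain ⟨L', rfl⟩ : ∃ L', L = L' + 1 := ⟨L - 1, by omega⟩
  have hlt : i < cs.length := by omega
  have hc : cs[i] = c := by
    have := hrun i (le_refl i) (by omega)
    rwa [getElem!_pos cs i hlt] at this
  have hw1 : (if some c = prev then (2:Int) else 1) = 1 :=
    if_neg (fun h => hprev h.symm)
  rw [← List.getElem_cons_drop hlt, hc, pvCutAux_cons, hw1]
  by_cases hb : b < 1
  · rw [if_pos hb, if_neg (by push_cast; omega)]
    have := pvFd2_nonpos (b+1) (by omega)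
    omega
  · rw [if_neg hb]
    rw [pvCut_inrun cs c L' (i+1) (b-1) (by omega) (fun p hp1 hp2 => hrun p (by omega) (by omega))]
    by_cases h2 : 2*(((L':Nat)+1 : Nat):Int) - 1 ≤ b
    · rw [if_pos (by push_cast at h2; omega), if_pos (by push_cast at h2; omega)]
      have h1 : i + 1 + L' = i + (L'+1) := by omega
      have h3 : b - 1 - 2*(L':Int) = b - (2*(((L':Nat)+1 : Nat):Int) - 1) := by push_cast; ring
      rw [h1, h3]
      push_cast
      omega
    · rw [if_neg (by push_cast at h2; omega), if_neg (by push_cast; push_cast at h2; omega)]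
      have hsucc := pvFd2_succ (b-1)
      have harith : b - 1 + 2 = b + 1 := by omega
      rw [harith] at hsucc
      have hnn := pvFd2_nonneg (b-1) (by omega)
      omega

lemma pvRunEnd_le (cs : List Char) (c : Char) : ∀ k j, cs.length - j = k → j ≤ cs.length →
    pvRunEnd cs c j ≤ cs.length := by
  intro k
  induction k with
  | zero =>
    intro j hk hj
    rw [pvRunEnd]
    split
    · omega
    · exact hj
  | succ k ih =>
    intro j hk hj
    rw [pvRunEnd]
    split
    · split
      · exact ih (j+1) (by omega) (by omega)
      · exact hj
    · exact hj

lemma pvRunEnd_run (cs : List Char) (c : Char) : ∀ k j, cs.length - j = k →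
    ∀ p, j ≤ p → p < pvRunEnd cs c j → cs[p]! = c := by
  intro k
  induction k with
  | zero =>
    intro j hk p hp1 hp2
    rw [pvRunEnd] at hp2
    split at hp2
    · omega
    · omega
  | succ k ih =>
    intro j hk p hp1 hp2
    rw [pvRunEnd] at hp2
    split at hp2
    · split at hp2
      · rcases Nat.eq_or_lt_of_le hp1 with h | h
        · subst h; assumption
        · exact ih (j+1) (by omega) p (by omega) hp2
      · omega
    · omega

lemma pvRunEnd_stop (cs : List Char) (c : Char) : ∀ k j, cs.length - j = k →
    pvRunEnd cs c j ≥ cs.length ∨ cs[pvRunEnd cs c j]! ≠ c := by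
  intro k
  induction k with
  | zero =>
    intro j hk
    rw [pvRunEnd]
    split
    · omega
    · left; omega
  | succ k ih =>
    intro j hk
    rw [pvRunEnd]
    split
    · split
      · exact ih (j+1) (by omega)
      · right; assumption
    · left; omega

-- B's loop equals the reference walk (entered only at run starts)
lemma pvGoB_eq (cs : List Char) :
    ∀ k i (b : Int) (prev : Option Char), cs.length - i = k → i ≤ cs.length →
    (∀ _ : i < cs.length, prev ≠ some (cs[i]!)) →
    truncateLabelGoB cs b i = String.ofList (cs.take (i + pvCutAux prev (cs.drop i) b)) := by
  intro k
  induction k using Nat.strong_induction_on with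
  | _ k ih =>
    intro i b prev hk hi hprev
    by_cases hlt : i < cs.length
    · rw [truncateLabelGoB, dif_pos hlt]
      set c := cs[i]! with hcdef
      set j := pvRunEnd cs c (i+1) with hjdef
      have hge : i + 1 ≤ j := pvRunEnd_ge cs c _ (i+1) rfl
      have hle : j ≤ cs.length := pvRunEnd_le cs c _ (i+1) rfl (by omega)
      have hrun : ∀ p, i ≤ p → p < j → cs[p]! = c := by
        intro p hp1 hp2
        rcases Nat.eq_or_lt_of_le hp1 with h | h
        · subst h; rfl
        · exact pvRunEnd_run cs c _ (i+1) rfl p (by omega) hp2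
      have hstop := pvRunEnd_stop cs c _ (i+1) rfl
      set L : Nat := j - i with hLdef
      have hLcast : ((j:Int) - (i:Int)) = (L:Int) := by omega
      have hcut := pvCut_run cs c L i b prev (by omega) (by omega)
        (fun p h1 h2 => hrun p h1 (by omega)) (hprev hlt)
      have hij : i + L = j := by omega
      rw [hij] at hcut
      rw [hLcast]
      by_cases hcost : 2*(L:Int) - 1 ≤ b
      · rw [if_pos hcost]
        rw [ih (cs.length - j) (by omega) j (b - (2*(L:Int)-1)) (some c) rfl (by omega)
          (fun h => by
            rcases hstop with h' | h'
            · omega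
            · exact fun he => h' (Option.some.inj he).symm)]
        rw [hcut, if_pos hcost]
        congr 2
        omega
      · rw [if_neg hcost, hcut, if_neg hcost]
    · rw [truncateLabelGoB, dif_neg hlt]
      have : i = cs.length := by omega
      subst this
      simp [pvCutAux]

-- ===== VERDICT (by name: the statement is the Claim_ definition above) =====
theorem truncateLabel_spec : Claim_equal_truncateLabel := by
  intro text m _
  unfold Spec_truncateLabel truncateLabel truncateLabel_alt
  rw [pvGoA_eq text.toList m text.toList.length 0 0 (by omega) (by omega)]
  rw [pvGoB_eq text.toList text.toList.length 0 m none (by omega) (by omega) (by simp)]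
  simp
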